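-- pv_equiv track=rewrite | github.com/AnissL93/pipe-proxylessnas | search/utils/find_split_point.py | sp_to_range
-- ===== SOURCE A (Python) =====
-- def sp_to_range(sp, n):
--     """extend split points into a list of ranges
--
--     e.g.,
--     sp = (3,6), n = 10, will return:
--     [(0,4), (4, 7), (7, 10)]
--
--     (0,4) means 0 <= i < 4
--     """
--     ret = []
--     st = 0
--     ed = 0
--     for i in range(len(sp)+1):
--         if i == 0:
--             ret.append((0, sp[0]+1))
--         elif i==len(sp):
--             ret.append((sp[i-1]+1, n))
--         else:
--             ret.append((sp[i-1]+1, sp[i]+1))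
--     return ret
-- ===== SOURCE B (Python) =====
-- def sp_to_range(sp, n):
--     bounds = [0] + [s + 1 for s in sp] + [n]
--     return list(zip(bounds, bounds[1:]))
-- ===== Notes on version B (the rewrite author's own statement) =====
-- stated objective: simpler
-- what changed: Replaces the three-way i==0 / i==len(sp) / else branching inside an index loop by building the boundary list [0] + [s+1 for s in sp] + [n] once and zipping it with its own tail.
-- outside the precondition, e.g. on sp_to_range((), 5): A raises IndexError, B returns [(0, 5)]
import Mathlib
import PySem

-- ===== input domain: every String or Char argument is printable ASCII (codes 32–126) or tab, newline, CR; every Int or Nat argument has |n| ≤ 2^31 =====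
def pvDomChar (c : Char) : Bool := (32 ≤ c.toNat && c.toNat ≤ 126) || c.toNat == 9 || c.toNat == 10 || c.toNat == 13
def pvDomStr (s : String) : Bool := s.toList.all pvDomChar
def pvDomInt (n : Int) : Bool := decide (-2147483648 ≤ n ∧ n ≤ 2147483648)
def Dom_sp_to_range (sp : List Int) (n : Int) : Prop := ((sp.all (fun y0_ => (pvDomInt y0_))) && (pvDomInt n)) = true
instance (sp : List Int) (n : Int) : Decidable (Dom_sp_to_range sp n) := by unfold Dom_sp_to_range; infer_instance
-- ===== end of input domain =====

-- B builds the boundary list [0] + [s+1 for s in sp] + [n] once and zips it with its tail,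
-- replacing A's three-way branching index loop (objective: simpler).


-- ===== PORT A =====
-- literal port of A's index loop; sp[0], sp[i-1], sp[i] are read with pyGetD, which only
-- matters on empty sp — exactly the inputs Pre_ excludes (Python raises IndexError there)
def sp_to_range (sp : List Int) (n : Int) : List (Int × Int) :=
  (PySem.List.pyRange 0 ((sp.length : Int) + 1) 1).foldl
    (fun ret i =>
      if i = 0 then ret ++ [((0 : Int), PySem.List.pyGetD sp 0 0 + 1)]
      else if i = (sp.length : Int) then ret ++ [(PySem.List.pyGetD sp (i - 1) 0 + 1, n)]
      else ret ++ [(PySem.List.pyGetD sp (i - 1) 0 + 1, PySem.List.pyGetD sp i 0 + 1)])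
    []

-- ===== PORT B =====
def sp_to_range_alt (sp : List Int) (n : Int) : List (Int × Int) :=
  let bounds : List Int := 0 :: (sp.map (· + 1) ++ [n])
  bounds.zip (bounds.drop 1)

-- ===== PRECONDITION & SPEC =====
-- Pre_ excludes exactly empty sp, on which Python A raises IndexError (it reads sp[0]).
def Pre_sp_to_range (sp : List Int) (n : Int) : Prop := sp ≠ []
instance (sp : List Int) (n : Int) : Decidable (Pre_sp_to_range sp n) := by unfold Pre_sp_to_range; infer_instance
def pvWitness_sp_to_range : List Int × Int := ([3, 6], 10)

def Spec_sp_to_range (sp : List Int) (n : Int) (out : List (Int × Int)) : Prop := out = sp_to_range_alt sp n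
instance (sp : List Int) (n : Int) (out : List (Int × Int)) : Decidable (Spec_sp_to_range sp n out) := by unfold Spec_sp_to_range; infer_instance

-- ===== CLAIM (what is proved, stated in full; the proofs are below) =====
def Claim_equal_sp_to_range : Prop := ∀ (sp : List Int) (n : Int), Dom_sp_to_range sp n → Pre_sp_to_range sp n → Spec_sp_to_range sp n (sp_to_range sp n)

-- ===== LEMMAS AND PROOFS =====

-- the pair A appends at loop index i
def gA (sp : List Int) (n : Int) (i : Int) : Int × Int :=
  if i = 0 then ((0 : Int), PySem.List.pyGetD sp 0 0 + 1)
  else if i = (sp.length : Int) then (PySem.List.pyGetD sp (i - 1) 0 + 1, n)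
  else (PySem.List.pyGetD sp (i - 1) 0 + 1, PySem.List.pyGetD sp i 0 + 1)

theorem sp_to_range_eq_map (sp : List Int) (n : Int) :
    sp_to_range sp n = (List.range (sp.length + 1)).map (fun k : Nat => gA sp n (k : Int)) := by
  unfold sp_to_range
  have hfun : (fun (ret : List (Int × Int)) (i : Int) =>
      if i = 0 then ret ++ [((0 : Int), PySem.List.pyGetD sp 0 0 + 1)]
      else if i = (sp.length : Int) then ret ++ [(PySem.List.pyGetD sp (i - 1) 0 + 1, n)]
      else ret ++ [(PySem.List.pyGetD sp (i - 1) 0 + 1, PySem.List.pyGetD sp i 0 + 1)])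
      = fun ret i => ret ++ [gA sp n i] := by
    funext ret i
    unfold gA
    split_ifs <;> rfl
  rw [hfun, PySem.List.foldl_append_singleton_eq_map, PySem.List.pyRange_one, List.map_map]
  have : ((sp.length : Int) + 1 - 0).toNat = sp.length + 1 := by omega
  rw [this]
  apply List.map_congr_left
  intro k _
  simp [Function.comp]

-- entries of the boundary list, via getD to stay total
theorem bounds_get (sp : List Int) (n : Int) (j : Nat) (hj : j < sp.length + 2) :
    (0 :: (sp.map (· + 1) ++ [n]))[j]'(by simp; omega) =
      (if j = 0 then 0 else if j = sp.length + 1 then n else sp.getD (j - 1) 0 + 1) := by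
  match j with
  | 0 => simp
  | j + 1 =>
    simp only [List.getElem_cons_succ]
    by_cases h : j < sp.length
    · rw [List.getElem_append_left (by simpa using h)]
      have h1 : ¬ (j + 1 = sp.length + 1) := by omega
      simp [List.getD, h]
      exact fun h' => absurd h' (by omega)
    · have hj' : j = sp.length := by omega
      subst hj'
      rw [List.getElem_append_right (by simp)]
      simp

theorem sp_to_range_spec : Claim_equal_sp_to_range := by
  intro sp n _ hpre
  unfold Spec_sp_to_range sp_to_range_alt
  rw [sp_to_range_eq_map]
  have hsp : 0 < sp.length := by
    cases sp with
    | nil => exact absurd rfl hpre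
    | cons a l => simp
  have hgd : ∀ (k : Nat), PySem.List.pyGetD sp (k : Int) 0 = sp.getD k 0 :=
    fun k => PySem.List.pyGetD_natCast sp k 0
  apply List.ext_getElem
  · simp
  · intro i h1 h2
    simp only [List.getElem_map, List.getElem_range, List.getElem_zip, List.getElem_drop]
    have hi : i < sp.length + 1 := by simpa using h1
    rw [bounds_get sp n i (by omega), bounds_get sp n (1 + i) (by omega)]
    unfold gA
    by_cases h0 : i = 0
    · subst h0
      have hz : ((0 : Nat) : Int) = 0 := rfl
      have h1' : ¬ (1 + 0 = sp.length + 1) := by omega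
      simp only [hz, if_neg h1']
      exact congrArg (fun x => ((0 : Int), x + 1)) (hgd 0)
    · have hne0 : ¬ ((i : Int) = 0) := by exact_mod_cast h0
      have hfst : ¬ (i = sp.length + 1) := by omega
      have hsub : ((i : Int) - 1) = ((i - 1 : Nat) : Int) := by omega
      by_cases hL : i = sp.length
      · have hc : ((i : Int) = (sp.length : Int)) := by exact_mod_cast hL
        have hn : (1 + i = sp.length + 1) := by omega
        have hn0 : ¬ (1 + i = 0) := by omega
        simp only [if_neg hne0, if_pos hc, if_neg h0, if_neg hfst, if_neg hn0, if_pos hn, hsub, hgd]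
      · have hc : ¬ ((i : Int) = (sp.length : Int)) := by
          intro h; exact hL (by exact_mod_cast h)
        have hn : ¬ (1 + i = sp.length + 1) := by omega
        have hn0 : ¬ (1 + i = 0) := by omega
        have hid : 1 + i - 1 = i := by omega
        simp only [if_neg hne0, if_neg hc, if_neg h0, if_neg hfst, if_neg hn0, if_neg hn,
          hsub, hgd, hid]
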